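-- pv_equiv track=rewrite | github.com/heartsh/consprob-trained | scripts/generate_bprna_fasta_files.py | remove_pseudoknots
-- ===== SOURCE A (Python) =====
-- brackets = ["<", ">", "[", "]", "{", "}", "A", "a", "B", "b", "C", "c", "D", "d", "E", "e"]
--
-- def remove_pseudoknots(dbn):
--   result_str = dbn
--   str_len = len(dbn)
--   for i in range(str_len):
--     char = dbn[i]
--     if char in brackets:
--       result_str = result_str[: i] + "." + result_str[i + 1 :]
--   return result_str
-- ===== SOURCE B (Python) =====
-- _TABLE = str.maketrans({c: "." for c in "<>[]{}AaBbCcDdEe"})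
--
-- def remove_pseudoknots(dbn):
--   return dbn.translate(_TABLE)
-- ===== Notes on version B (the rewrite author's own statement) =====
-- stated objective: idiomatic
-- what changed: Replaced the index loop that rebuilds the whole string at every bracket hit (slice + '.' + slice) with a translation table built once via str.maketrans and a single dbn.translate pass.
import Mathlib
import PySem

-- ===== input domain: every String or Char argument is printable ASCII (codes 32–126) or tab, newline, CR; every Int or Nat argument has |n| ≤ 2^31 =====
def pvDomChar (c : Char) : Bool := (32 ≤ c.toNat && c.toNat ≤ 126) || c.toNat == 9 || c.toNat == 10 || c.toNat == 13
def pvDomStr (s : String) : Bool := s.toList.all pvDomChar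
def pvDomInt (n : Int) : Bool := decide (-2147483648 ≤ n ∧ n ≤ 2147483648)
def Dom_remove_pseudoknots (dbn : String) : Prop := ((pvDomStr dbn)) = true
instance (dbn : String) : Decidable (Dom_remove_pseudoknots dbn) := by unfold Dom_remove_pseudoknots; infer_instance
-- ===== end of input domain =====

-- B replaces A's index loop (which rebuilds the whole string at every bracket hit) by a
-- single table-driven translate pass; objective: idiomatic/faster single pass.

-- ===== PORT A =====
def pkBrackets : List Char :=
  ['<', '>', '[', ']', '{', '}', 'A', 'a', 'B', 'b', 'C', 'c', 'D', 'd', 'E', 'e']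

-- one iteration of A's loop body: char = dbn[i]; if char in brackets: result = result[:i] + "." + result[i+1:]
def pkStep (cs : List Char) (result : List Char) (i : Int) : List Char :=
  let char := PySem.List.pyGetD cs i ' '
  if char ∈ pkBrackets then
    PySem.List.slice result none (some i) ++ ['.'] ++ PySem.List.slice result (some (i + 1)) none
  else result

def remove_pseudoknots (dbn : String) : String :=
  let cs := dbn.toList
  String.ofList ((PySem.List.pyRange 0 cs.length 1).foldl (pkStep cs) cs)

-- ===== PORT B =====
-- the maketrans table: each bracket character maps to '.'
def pkTable : List (Char × Char) :=
  [('<', '.'), ('>', '.'), ('[', '.'), (']', '.'), ('{', '.'), ('}', '.'),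
   ('A', '.'), ('a', '.'), ('B', '.'), ('b', '.'), ('C', '.'), ('c', '.'),
   ('D', '.'), ('d', '.'), ('E', '.'), ('e', '.')]

-- dbn.translate(_TABLE): one pass, each char replaced by its table entry (itself if absent)
def remove_pseudoknots_alt (dbn : String) : String :=
  String.ofList (dbn.toList.map (fun c => (pkTable.lookup c).getD c))

-- ===== PRECONDITION & SPEC =====
def Spec_remove_pseudoknots (dbn : String) (out : String) : Prop := out = remove_pseudoknots_alt dbn
instance (dbn : String) (out : String) : Decidable (Spec_remove_pseudoknots dbn out) := by unfold Spec_remove_pseudoknots; infer_instance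

-- ===== CLAIM (what is proved, stated in full; the proofs are below) =====
def Claim_equal_remove_pseudoknots : Prop := ∀ (dbn : String), Dom_remove_pseudoknots dbn → Spec_remove_pseudoknots dbn (remove_pseudoknots dbn)

-- ===== LEMMAS AND PROOFS =====

-- the per-character replacement both programs realise
def pkF (c : Char) : Char := if c ∈ pkBrackets then '.' else c

lemma pkTable_lookup (c : Char) : (pkTable.lookup c).getD c = pkF c := by
  by_cases hc : c ∈ pkBrackets
  · fin_cases hc <;> decide
  · have hne : c ≠ '<' ∧ c ≠ '>' ∧ c ≠ '[' ∧ c ≠ ']' ∧ c ≠ '{' ∧ c ≠ '}' ∧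
        c ≠ 'A' ∧ c ≠ 'a' ∧ c ≠ 'B' ∧ c ≠ 'b' ∧ c ≠ 'C' ∧ c ≠ 'c' ∧
        c ≠ 'D' ∧ c ≠ 'd' ∧ c ≠ 'E' ∧ c ≠ 'e' := by
      simp [pkBrackets] at hc; tauto
    obtain ⟨h1,h2,h3,h4,h5,h6,h7,h8,h9,h10,h11,h12,h13,h14,h15,h16⟩ := hne
    simp [pkTable, List.lookup, pkF, hc,
      beq_eq_false_iff_ne.mpr h1, beq_eq_false_iff_ne.mpr h2, beq_eq_false_iff_ne.mpr h3,
      beq_eq_false_iff_ne.mpr h4, beq_eq_false_iff_ne.mpr h5, beq_eq_false_iff_ne.mpr h6,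
      beq_eq_false_iff_ne.mpr h7, beq_eq_false_iff_ne.mpr h8, beq_eq_false_iff_ne.mpr h9,
      beq_eq_false_iff_ne.mpr h10, beq_eq_false_iff_ne.mpr h11, beq_eq_false_iff_ne.mpr h12,
      beq_eq_false_iff_ne.mpr h13, beq_eq_false_iff_ne.mpr h14, beq_eq_false_iff_ne.mpr h15,
      beq_eq_false_iff_ne.mpr h16]

-- loop invariant: after processing indices 0..n-1, the result is cs with its first n
-- characters translated and the rest untouched
lemma pkLoop_inv (cs : List Char) (n : Nat) (hn : n ≤ cs.length) :
    (PySem.List.pyRange 0 n 1).foldl (pkStep cs) cs = (cs.take n).map pkF ++ cs.drop n := by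
  induction n with
  | zero => simp [PySem.List.pyRange]
  | succ n ih =>
    have hn' : n ≤ cs.length := Nat.le_of_succ_le hn
    have hlt : n < cs.length := hn
    rw [show ((n + 1 : Nat) : Int) = (n : Int) + 1 by push_cast; ring,
      PySem.List.pyRange_one_succ_right (by omega), List.foldl_append, ih hn']
    have hget : PySem.List.pyGetD cs (n : Int) ' ' = cs[n] := by
      simpa using List.getD_eq_getElem cs ' ' hlt
    have hlen : ((cs.take n).map pkF).length = n := by
      simp [List.length_take, Nat.min_eq_left hn']
    have htake : (cs.take (n + 1)).map pkF = (cs.take n).map pkF ++ [pkF cs[n]] := by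
      rw [List.map_take, List.map_take, List.take_add_one]
      have hg : (List.map pkF cs)[n]? = some (pkF cs[n]) := by
        rw [List.getElem?_eq_getElem (by simpa using hlt)]; simp
      rw [hg]; simp
    have hdropn : cs.drop n = cs[n] :: cs.drop (n + 1) := by
      rw [List.drop_eq_getElem_cons hlt]
    simp only [List.foldl_cons, List.foldl_nil, pkStep, hget]
    by_cases hb : cs[n] ∈ pkBrackets
    · have hcast : ((n : Int) + 1) = ((n + 1 : Nat) : Int) := by push_cast; ring
      rw [if_pos hb, hcast, PySem.List.slice_to_natCast, PySem.List.slice_from_natCast,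
        htake]
      have hdot : pkF cs[n] = '.' := by simp [pkF, hb]
      rw [hdot]
      rw [List.take_append_of_le_length (by omega), List.take_of_length_le (by omega)]
      have : List.drop (n + 1) ((cs.take n).map pkF ++ cs.drop n)
          = cs.drop (n + 1) := by
        rw [hdropn, show n + 1 = ((cs.take n).map pkF).length + 1 by omega,
          List.drop_append]
        simp
      rw [this]
    · rw [if_neg hb, htake]
      have : pkF cs[n] = cs[n] := by simp [pkF, hb]
      rw [this, hdropn]
      simp

-- ===== VERDICT (by name: the statement is the Claim_ definition above) =====
theorem remove_pseudoknots_spec : Claim_equal_remove_pseudoknots := by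
  intro dbn _
  unfold Spec_remove_pseudoknots remove_pseudoknots remove_pseudoknots_alt
  have := pkLoop_inv dbn.toList dbn.toList.length (le_refl _)
  simp only [this, List.take_length, List.drop_length, List.append_nil]
  congr 1
  exact (List.map_congr_left fun c _ => (pkTable_lookup c).symm)
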